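-- pv_equiv track=rewrite | github.com/bighousevn/Rag_Graph_LawLaw | triplet_extractor_vi.py | expand_entity_indices
-- ===== SOURCE A (Python) =====
-- from typing import Any, Dict, List, Optional, Sequence
--
-- ENTITY_EXPAND_LABELS = {
--     "nmod",
--     "amod",
--     "det",
--     "mnr",
--     "loc",
--     "tmp",
--     "tmod",
--     "vmod",
--     "pob",
--     "iob",
--     "dob",
--     "conj",
--     "coord",
--     "punct",
-- }
--
-- def expand_entity_indices(seed_idxs: List[int], dep: List[str], head: List[int]) -> List[int]:
--     if not seed_idxs:
--         return []
--
--     collected = set(seed_idxs)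
--     changed = True
--     while changed:
--         changed = False
--         for i, d in enumerate(dep, start=1):
--             parent = head[i - 1]
--             if parent in collected and d.lower() in ENTITY_EXPAND_LABELS and i not in collected:
--                 collected.add(i)
--                 changed = True
--     return sorted(collected)
-- ===== SOURCE B (Python) =====
-- ENTITY_EXPAND_LABELS = {
--     "nmod", "amod", "det", "mnr", "loc", "tmp", "tmod", "vmod",
--     "pob", "iob", "dob", "conj", "coord", "punct",
-- }
--
-- def expand_entity_indices(seed_idxs, dep, head):
--     if not seed_idxs:
--         return []
--     # adjacency: parent -> eligible children, built once
--     children = {}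
--     for i, d in enumerate(dep, start=1):
--         if d.lower() in ENTITY_EXPAND_LABELS:
--             children.setdefault(head[i - 1], []).append(i)
--     collected = set(seed_idxs)
--     stack = list(seed_idxs)
--     while stack:
--         p = stack.pop()
--         for c in children.get(p, ()):
--             if c not in collected:
--                 collected.add(c)
--                 stack.append(c)
--     return sorted(collected)
-- ===== Notes on version B (the rewrite author's own statement) =====
-- stated objective: alternative
-- what changed: Replaced the repeat-until-no-change full rescans of the dependency list with a parent->eligible-children adjacency dict built once plus a single worklist (stack) traversal from the seeds.
import Mathlib
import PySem

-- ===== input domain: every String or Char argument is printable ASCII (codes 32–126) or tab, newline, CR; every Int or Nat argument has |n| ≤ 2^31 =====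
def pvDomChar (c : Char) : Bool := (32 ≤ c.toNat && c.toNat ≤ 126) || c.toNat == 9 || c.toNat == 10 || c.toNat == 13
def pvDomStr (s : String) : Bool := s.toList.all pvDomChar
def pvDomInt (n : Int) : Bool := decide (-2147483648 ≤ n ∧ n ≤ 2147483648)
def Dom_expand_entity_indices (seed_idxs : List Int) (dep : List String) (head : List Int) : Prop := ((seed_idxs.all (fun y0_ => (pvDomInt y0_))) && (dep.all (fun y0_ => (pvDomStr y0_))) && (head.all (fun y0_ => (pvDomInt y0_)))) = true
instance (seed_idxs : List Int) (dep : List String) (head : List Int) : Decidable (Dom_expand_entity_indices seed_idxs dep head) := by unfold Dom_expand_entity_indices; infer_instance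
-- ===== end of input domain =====

-- B replaces A's repeat-until-no-change rescans of the dependency list by a parent→children
-- adjacency dict built once plus a single worklist traversal from the seeds (objective: alternative algorithm).

-- ===== PORT A =====
def entityExpandLabels : List String :=
  ["nmod", "amod", "det", "mnr", "loc", "tmp", "tmod", "vmod",
   "pob", "iob", "dob", "conj", "coord", "punct"]

-- body of A's inner 'for i, d in enumerate(dep, start=1)' loop
def stepA (head : List Int) (st : List Int × Bool) (p : Int × String) : List Int × Bool :=
  if PySem.List.pyGetD head (p.1 - 1) 0 ∈ st.1 ∧
     PySem.Str.lower p.2 ∈ entityExpandLabels ∧ p.1 ∉ st.1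
  then (PySem.Set.add st.1 p.1, true) else st

-- one pass of A's 'for' loop over the whole dependency list
def passA (dep : List String) (head : List Int) (st : List Int × Bool) : List Int × Bool :=
  (PySem.List.enumerate dep 1).foldl (stepA head) st

-- termination measure: how many token indices 1..len(dep) are not yet collected
def pvMu (n : Nat) (c : List Int) : Nat :=
  ((PySem.List.pyRange 1 ((n : Int) + 1) 1).filter (fun x => decide (x ∉ c))).length

-- the inner pass only appends fresh items taken from the enumerated list, and the flag
-- records whether anything was appended
theorem passA_ext (head : List Int) (l : List (Int × String)) (c : List Int) (b : Bool) :
    ∃ ext, l.foldl (stepA head) (c, b) = (c ++ ext, b || !ext.isEmpty) ∧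
      ∀ x ∈ ext, (∃ d, (x, d) ∈ l) ∧ x ∉ c := by
  induction l generalizing c b with
  | nil => exact ⟨[], by simp, by simp⟩
  | cons q l ih =>
    by_cases hc : PySem.List.pyGetD head (q.1 - 1) 0 ∈ c ∧
        PySem.Str.lower q.2 ∈ entityExpandLabels ∧ q.1 ∉ c
    · obtain ⟨ext, he, hx⟩ := ih (c ++ [q.1]) true
      refine ⟨q.1 :: ext, ?_, ?_⟩
      · simp only [List.foldl_cons, stepA, if_pos hc,
          PySem.Set.add_of_not_mem hc.2.2, he]
        simp
      · intro x hxm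
        rcases List.mem_cons.1 hxm with h | hxe
        · subst h
          exact ⟨⟨q.2, by simp⟩, hc.2.2⟩
        · obtain ⟨⟨d, hd⟩, hnc⟩ := hx x hxe
          exact ⟨⟨d, by simp [hd]⟩, fun h => hnc (by simp [h])⟩
    · obtain ⟨ext, he, hx⟩ := ih c b
      refine ⟨ext, ?_, ?_⟩
      · simpa only [List.foldl_cons, stepA, if_neg hc] using he
      · intro x hxm
        obtain ⟨⟨d, hd⟩, hnc⟩ := hx x hxm
        exact ⟨⟨d, by simp [hd]⟩, hnc⟩

-- appending fresh in-range elements strictly shrinks the measure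
theorem pvMu_lt {n : Nat} {c ext : List Int} (hne : ext ≠ [])
    (hsub : ∀ x ∈ ext, x ∈ PySem.List.pyRange 1 ((n : Int) + 1) 1 ∧ x ∉ c) :
    pvMu n (c ++ ext) < pvMu n c := by
  obtain ⟨x, hx⟩ := List.exists_mem_of_ne_nil ext hne
  obtain ⟨hxr, hxc⟩ := hsub x hx
  have hsl : ((PySem.List.pyRange 1 ((n : Int) + 1) 1).filter (fun y => decide (y ∉ c ++ ext))).Sublist
      ((PySem.List.pyRange 1 ((n : Int) + 1) 1).filter (fun y => decide (y ∉ c))) := by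
    apply List.monotone_filter_right
    intro a ha
    simp only [decide_eq_true_eq] at *
    exact fun hac => ha (by simp [hac])
  have hlen := hsl.length_le
  rcases Nat.lt_or_ge (pvMu n (c ++ ext)) (pvMu n c) with h | h
  · exact h
  · exfalso
    have heq : ((PySem.List.pyRange 1 ((n : Int) + 1) 1).filter (fun y => decide (y ∉ c ++ ext))) =
        ((PySem.List.pyRange 1 ((n : Int) + 1) 1).filter (fun y => decide (y ∉ c))) :=
      hsl.eq_of_length (Nat.le_antisymm hlen h)
    have hxin : x ∈ ((PySem.List.pyRange 1 ((n : Int) + 1) 1).filter (fun y => decide (y ∉ c))) := by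
      simp [List.mem_filter, hxr, hxc]
    rw [← heq] at hxin
    have h2 := List.of_mem_filter hxin
    simp only [decide_eq_true_eq, List.mem_append, not_or] at h2
    exact h2.2 hx

theorem enumerate_fst_range {dep : List String} {x : Int} {d : String}
    (h : (x, d) ∈ PySem.List.enumerate dep 1) :
    x ∈ PySem.List.pyRange 1 ((dep.length : Int) + 1) 1 := by
  rw [PySem.List.mem_enumerate_iff] at h
  obtain ⟨k, hk, hp⟩ := h
  have hx : x = 1 + (k : Int) := by simpa using congrArg Prod.fst hp
  rw [PySem.List.mem_pyRange_one]
  constructor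
  · omega
  · rw [hx]; omega

-- A's 'while changed' loop
def loopA (dep : List String) (head : List Int) (collected : List Int) : List Int :=
  if (passA dep head (collected, false)).2
  then loopA dep head (passA dep head (collected, false)).1
  else (passA dep head (collected, false)).1
termination_by pvMu dep.length collected
decreasing_by
  rename_i hcond
  obtain ⟨ext, he, hx⟩ := passA_ext head (PySem.List.enumerate dep 1) collected false
  have hr : passA dep head (collected, false) = (collected ++ ext, false || !ext.isEmpty) := he
  rw [hr] at hcond ⊢
  have hne : ext ≠ [] := by
    intro h0
    subst h0
    simp at hcond
  exact pvMu_lt hne (fun x hxm =>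
    ⟨enumerate_fst_range (hx x hxm).1.choose_spec, (hx x hxm).2⟩)

def expand_entity_indices (seed_idxs : List Int) (dep : List String) (head : List Int) : List Int :=
  if seed_idxs = [] then []
  else PySem.List.sorted (loopA dep head (PySem.Set.ofList seed_idxs)) (fun x => x) false

-- ===== PORT B =====
-- body of B's adjacency-building loop ('children.setdefault(head[i-1], []).append(i)')
def stepC (head : List Int) (ch : PySem.Dict Int (List Int)) (p : Int × String) :
    PySem.Dict Int (List Int) :=
  if PySem.Str.lower p.2 ∈ entityExpandLabels
  then PySem.Dict.modify ch (PySem.List.pyGetD head (p.1 - 1) 0) [] (fun l => l ++ [p.1])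
  else ch

def childrenB (dep : List String) (head : List Int) : PySem.Dict Int (List Int) :=
  (PySem.List.enumerate dep 1).foldl (stepC head) PySem.Dict.empty

-- body of B's 'for c in children.get(p, ())' loop
def stepB (st : List Int × List Int) (c : Int) : List Int × List Int :=
  if c ∈ st.1 then st else (PySem.Set.add st.1 c, st.2 ++ [c])

-- B's inner for-loop over the children of the popped parent
def innerB (dep : List String) (head : List Int) (p : Int) (st : List Int × List Int) :
    List Int × List Int :=
  ((childrenB dep head).getD p []).foldl stepB st

-- the eligible-child relation both programs expand along
def EdgeE (dep : List String) (head : List Int) (p c : Int) : Prop :=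
  ∃ d, (c, d) ∈ PySem.List.enumerate dep 1 ∧ PySem.Str.lower d ∈ entityExpandLabels ∧
    PySem.List.pyGetD head (c - 1) 0 = p

theorem mem_foldl_stepC (head : List Int) (l : List (Int × String)) :
    ∀ (ch : PySem.Dict Int (List Int)) (p c : Int),
      c ∈ (l.foldl (stepC head) ch).getD p [] ↔
        c ∈ ch.getD p [] ∨ ∃ d, (c, d) ∈ l ∧ PySem.Str.lower d ∈ entityExpandLabels ∧
          PySem.List.pyGetD head (c - 1) 0 = p := by
  induction l with
  | nil => simp
  | cons q l ih =>
    intro ch p c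
    by_cases hq : PySem.Str.lower q.2 ∈ entityExpandLabels
    · rw [List.foldl_cons]
      simp only [stepC, if_pos hq]
      rw [ih, PySem.Dict.getD_modify]
      constructor
      · rintro (hm | ⟨d, hd, hld, hh⟩)
        · by_cases hpk : p = PySem.List.pyGetD head (q.1 - 1) 0
          · rw [if_pos hpk] at hm
            rcases List.mem_append.1 hm with hm | hm
            · exact Or.inl (hpk ▸ hm)
            · simp only [List.mem_singleton] at hm
              subst hm
              exact Or.inr ⟨q.2, List.mem_cons_self .., hq, hpk.symm⟩
          · rw [if_neg hpk] at hm
            exact Or.inl hm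
        · exact Or.inr ⟨d, List.mem_cons_of_mem _ hd, hld, hh⟩
      · rintro (hm | ⟨d, hd, hld, hh⟩)
        · by_cases hpk : p = PySem.List.pyGetD head (q.1 - 1) 0
          · rw [if_pos hpk]
            exact Or.inl (List.mem_append.2 (Or.inl (hpk ▸ hm)))
          · rw [if_neg hpk]
            exact Or.inl hm
        · rcases List.mem_cons.1 hd with hd | hd
          · have hc : c = q.1 := by simpa using congrArg Prod.fst hd
            have hpk : p = PySem.List.pyGetD head (q.1 - 1) 0 := by rw [← hh, hc]
            left
            rw [if_pos hpk]
            exact List.mem_append.2 (Or.inr (by simp [hc]))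
          · exact Or.inr ⟨d, hd, hld, hh⟩
    · rw [List.foldl_cons]
      simp only [stepC, if_neg hq]
      rw [ih]
      constructor
      · rintro (hm | ⟨d, hd, hld, hh⟩)
        · exact Or.inl hm
        · exact Or.inr ⟨d, List.mem_cons_of_mem _ hd, hld, hh⟩
      · rintro (hm | ⟨d, hd, hld, hh⟩)
        · exact Or.inl hm
        · rcases List.mem_cons.1 hd with hd | hd
          · have hdq : d = q.2 := by simpa using congrArg Prod.snd hd
            exact absurd (hdq ▸ hld) hq
          · exact Or.inr ⟨d, hd, hld, hh⟩

theorem mem_childrenB (dep : List String) (head : List Int) (p c : Int) :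
    c ∈ (childrenB dep head).getD p [] ↔ EdgeE dep head p c := by
  unfold childrenB EdgeE
  rw [mem_foldl_stepC]
  simp [PySem.Dict.getD_empty]

-- B's inner for-loop only appends fresh elements of cs, to both components,
-- and afterwards every element of cs is collected
theorem stepB_ext (cs : List Int) : ∀ (col stk : List Int),
    ∃ ext, cs.foldl stepB (col, stk) = (col ++ ext, stk ++ ext) ∧
      (∀ x ∈ ext, x ∈ cs ∧ x ∉ col) ∧ ∀ x ∈ cs, x ∈ col ++ ext := by
  induction cs with
  | nil => exact fun col stk => ⟨[], by simp, by simp, by simp⟩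
  | cons c cs ih =>
    intro col stk
    by_cases hc : c ∈ col
    · obtain ⟨ext, he, hx, hall⟩ := ih col stk
      refine ⟨ext, by simpa only [List.foldl_cons, stepB, if_pos hc] using he, ?_, ?_⟩
      · exact fun x hxm => ⟨List.mem_cons_of_mem _ (hx x hxm).1, (hx x hxm).2⟩
      · intro x hxm
        rcases List.mem_cons.1 hxm with h | h
        · exact h ▸ List.mem_append.2 (Or.inl hc)
        · exact hall x h
    · obtain ⟨ext, he, hx, hall⟩ := ih (col ++ [c]) (stk ++ [c])
      refine ⟨c :: ext, ?_, ?_, ?_⟩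
      · simp only [List.foldl_cons, stepB, if_neg hc, PySem.Set.add_of_not_mem hc, he]
        simp
      · intro x hxm
        rcases List.mem_cons.1 hxm with h | h
        · subst h
          exact ⟨List.mem_cons_self .., hc⟩
        · obtain ⟨h1, h2⟩ := hx x h
          exact ⟨List.mem_cons_of_mem _ h1, fun hm => h2 (by simp [hm])⟩
      · intro x hxm
        rcases List.mem_cons.1 hxm with h | h
        · simp [h]
        · have h3 := hall x h
          rw [List.append_assoc] at h3
          exact h3

theorem edge_range {dep : List String} {head : List Int} {p c : Int}
    (h : EdgeE dep head p c) : c ∈ PySem.List.pyRange 1 ((dep.length : Int) + 1) 1 := by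
  obtain ⟨d, hd, _, _⟩ := h
  exact enumerate_fst_range hd

-- B's worklist loop ('while stack: p = stack.pop(); …')
def bfsB (dep : List String) (head : List Int) (collected stack : List Int) : List Int :=
  match stack with
  | [] => collected
  | q :: rest =>
    bfsB dep head
      (innerB dep head ((q :: rest).getLast (by simp)) (collected, (q :: rest).dropLast)).1
      (innerB dep head ((q :: rest).getLast (by simp)) (collected, (q :: rest).dropLast)).2
termination_by (pvMu dep.length collected, stack.length)
decreasing_by
  obtain ⟨ext, he, hx, hall⟩ :=
    stepB_ext ((childrenB dep head).getD ((q :: rest).getLast (by simp)) [])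
      collected ((q :: rest).dropLast)
  have hr : innerB dep head ((q :: rest).getLast (by simp)) (collected, (q :: rest).dropLast)
      = (collected ++ ext, (q :: rest).dropLast ++ ext) := he
  rw [hr]
  by_cases hne : ext = []
  · subst hne
    simp only [List.append_nil]
    apply Prod.Lex.right
    simp
  · apply Prod.Lex.left
    refine pvMu_lt hne (fun x hxm => ⟨?_, (hx x hxm).2⟩)
    exact edge_range ((mem_childrenB dep head _ x).1 (hx x hxm).1)

def expand_entity_indices_alt (seed_idxs : List Int) (dep : List String) (head : List Int) : List Int :=
  if seed_idxs = [] then []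
  else PySem.List.sorted (bfsB dep head (PySem.Set.ofList seed_idxs) seed_idxs) (fun x => x) false

-- ===== PRECONDITION & SPEC =====
-- Pre_ excludes inputs on which A raises IndexError: with a nonempty seed list A reads
-- head[i-1] for every token i, so it crashes whenever head is shorter than dep.
def Pre_expand_entity_indices (seed_idxs : List Int) (dep : List String) (head : List Int) : Prop :=
  seed_idxs = [] ∨ dep.length ≤ head.length
instance (seed_idxs : List Int) (dep : List String) (head : List Int) :
    Decidable (Pre_expand_entity_indices seed_idxs dep head) := by
  unfold Pre_expand_entity_indices; infer_instance

def pvWitness_expand_entity_indices : List Int × List String × List Int := ([1], ["nmod"], [1])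

def Spec_expand_entity_indices (seed_idxs : List Int) (dep : List String) (head : List Int) (out : List Int) : Prop := out = expand_entity_indices_alt seed_idxs dep head
instance (seed_idxs : List Int) (dep : List String) (head : List Int) (out : List Int) : Decidable (Spec_expand_entity_indices seed_idxs dep head out) := by unfold Spec_expand_entity_indices; infer_instance

-- ===== CLAIM (what is proved, stated in full; the proofs are below) =====
def Claim_equal_expand_entity_indices : Prop := ∀ (seed_idxs : List Int) (dep : List String) (head : List Int), Dom_expand_entity_indices seed_idxs dep head → Pre_expand_entity_indices seed_idxs dep head → Spec_expand_entity_indices seed_idxs dep head (expand_entity_indices seed_idxs dep head)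

-- ===== LEMMAS AND PROOFS =====

-- the closure both programs compute: reachable from a seed along eligible edges
inductive ReachE (seeds : List Int) (dep : List String) (head : List Int) : Int → Prop
  | seed (x : Int) (h : x ∈ seeds) : ReachE seeds dep head x
  | step (p c : Int) (hp : ReachE seeds dep head p) (he : EdgeE dep head p c) :
      ReachE seeds dep head c

theorem reach_sub_of_closed {seeds : List Int} {dep : List String} {head : List Int}
    {S : List Int} (hseed : ∀ s ∈ seeds, s ∈ S)
    (hcl : ∀ p x, p ∈ S → EdgeE dep head p x → x ∈ S) :
    ∀ x, ReachE seeds dep head x → x ∈ S := by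
  intro x hx
  induction hx with
  | seed x h => exact hseed x h
  | step p c _ he ih => exact hcl p c ih he

theorem pvNodupSnoc {c : List Int} {a : Int} (hc : c.Nodup) (ha : a ∉ c) :
    (c ++ [a]).Nodup := by
  simp only [List.nodup_append, List.nodup_singleton]
  refine ⟨hc, trivial, ?_⟩
  intro x hx b hb
  rw [List.mem_singleton] at hb
  subst hb
  exact fun h => ha (h ▸ hx)

theorem passA_sound {seeds : List Int} {dep : List String} {head : List Int}
    (l : List (Int × String)) (hl : ∀ q ∈ l, q ∈ PySem.List.enumerate dep 1) :
    ∀ (c : List Int) (b : Bool), (∀ x ∈ c, ReachE seeds dep head x) →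
      ∀ x ∈ (l.foldl (stepA head) (c, b)).1, ReachE seeds dep head x := by
  induction l with
  | nil => exact fun c b hc x hx => hc x hx
  | cons q l ih =>
    intro c b hc x hx
    rw [List.foldl_cons] at hx
    by_cases hcnd : PySem.List.pyGetD head (q.1 - 1) 0 ∈ c ∧
        PySem.Str.lower q.2 ∈ entityExpandLabels ∧ q.1 ∉ c
    · simp only [stepA, if_pos hcnd, PySem.Set.add_of_not_mem hcnd.2.2] at hx
      have hedge : EdgeE dep head (PySem.List.pyGetD head (q.1 - 1) 0) q.1 :=
        ⟨q.2, by simpa using hl q (List.mem_cons_self ..), hcnd.2.1, rfl⟩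
      refine ih (fun r hr => hl r (List.mem_cons_of_mem _ hr)) _ _ ?_ x hx
      intro y hy
      rcases List.mem_append.1 hy with hy | hy
      · exact hc y hy
      · simp only [List.mem_singleton] at hy
        subst hy
        exact .step _ _ (hc _ hcnd.1) hedge
    · simp only [stepA, if_neg hcnd] at hx
      exact ih (fun r hr => hl r (List.mem_cons_of_mem _ hr)) c b hc x hx

theorem passA_nodup (head : List Int) (l : List (Int × String)) :
    ∀ (c : List Int) (b : Bool), c.Nodup → (l.foldl (stepA head) (c, b)).1.Nodup := by
  induction l with
  | nil => exact fun c b hc => hc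
  | cons q l ih =>
    intro c b hc
    rw [List.foldl_cons]
    by_cases hcnd : PySem.List.pyGetD head (q.1 - 1) 0 ∈ c ∧
        PySem.Str.lower q.2 ∈ entityExpandLabels ∧ q.1 ∉ c
    · simp only [stepA, if_pos hcnd, PySem.Set.add_of_not_mem hcnd.2.2]
      exact ih _ _ (pvNodupSnoc hc hcnd.2.2)
    · simp only [stepA, if_neg hcnd]
      exact ih c b hc

theorem passA_fix {head : List Int} (l : List (Int × String)) :
    ∀ (c : List Int) (b : Bool), (l.foldl (stepA head) (c, b)).1 = c →
      ∀ q ∈ l, PySem.List.pyGetD head (q.1 - 1) 0 ∈ c →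
        PySem.Str.lower q.2 ∈ entityExpandLabels → q.1 ∈ c := by
  induction l with
  | nil => intro c b _ q hq; simp at hq
  | cons w l ih =>
    intro c b hfix q hq hpar hlab
    rw [List.foldl_cons] at hfix
    by_cases hcnd : PySem.List.pyGetD head (w.1 - 1) 0 ∈ c ∧
        PySem.Str.lower w.2 ∈ entityExpandLabels ∧ w.1 ∉ c
    · exfalso
      simp only [stepA, if_pos hcnd, PySem.Set.add_of_not_mem hcnd.2.2] at hfix
      obtain ⟨ext, he, -⟩ := passA_ext head l (c ++ [w.1]) true
      rw [he] at hfix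
      have hlen := congrArg List.length hfix
      simp at hlen
    · simp only [stepA, if_neg hcnd] at hfix
      rcases List.mem_cons.1 hq with h | h
      · subst h
        exact not_not.1 (fun hn => hcnd ⟨hpar, hlab, hn⟩)
      · exact ih c b hfix q h hpar hlab

theorem loopA_super (dep : List String) (head : List Int) :
    ∀ c : List Int, ∀ x ∈ c, x ∈ loopA dep head c := by
  intro c
  induction c using loopA.induct dep head with
  | case1 c hcond ih =>
    intro x hx
    rw [loopA, if_pos hcond]
    obtain ⟨ext, he, -⟩ := passA_ext head (PySem.List.enumerate dep 1) c false
    have hr : passA dep head (c, false) = (c ++ ext, false || !ext.isEmpty) := he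
    exact ih _ (by rw [hr]; exact List.mem_append.2 (Or.inl hx))
  | case2 c hcond =>
    intro x hx
    rw [loopA, if_neg hcond]
    obtain ⟨ext, he, -⟩ := passA_ext head (PySem.List.enumerate dep 1) c false
    have hr : passA dep head (c, false) = (c ++ ext, false || !ext.isEmpty) := he
    rw [hr]
    exact List.mem_append.2 (Or.inl hx)

theorem loopA_nodup (dep : List String) (head : List Int) :
    ∀ c : List Int, c.Nodup → (loopA dep head c).Nodup := by
  intro c
  induction c using loopA.induct dep head with
  | case1 c hcond ih =>
    intro hc
    rw [loopA, if_pos hcond]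
    exact ih (passA_nodup head _ c false hc)
  | case2 c hcond =>
    intro hc
    rw [loopA, if_neg hcond]
    exact passA_nodup head _ c false hc

theorem loopA_sound {seeds : List Int} (dep : List String) (head : List Int) :
    ∀ c : List Int, (∀ x ∈ c, ReachE seeds dep head x) →
      ∀ x ∈ loopA dep head c, ReachE seeds dep head x := by
  intro c
  induction c using loopA.induct dep head with
  | case1 c hcond ih =>
    intro hc x hx
    rw [loopA, if_pos hcond] at hx
    exact ih (passA_sound _ (fun q hq => hq) c false hc) x hx
  | case2 c hcond =>
    intro hc x hx
    rw [loopA, if_neg hcond] at hx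
    exact passA_sound _ (fun q hq => hq) c false hc x hx

theorem loopA_closed (dep : List String) (head : List Int) :
    ∀ c : List Int, ∀ p x, p ∈ loopA dep head c → EdgeE dep head p x →
      x ∈ loopA dep head c := by
  intro c
  induction c using loopA.induct dep head with
  | case1 c hcond ih =>
    intro p x hp he
    rw [loopA, if_pos hcond] at hp ⊢
    exact ih p x hp he
  | case2 c hcond =>
    intro p x hp he
    obtain ⟨ext, hfe, -⟩ := passA_ext head (PySem.List.enumerate dep 1) c false
    have hr : passA dep head (c, false) = (c ++ ext, false || !ext.isEmpty) := hfe
    have hc2 : (passA dep head (c, false)).2 = false := by simpa using hcond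
    have hext : ext = [] := by
      have h2 := congrArg Prod.snd hr
      rw [hc2] at h2
      simpa using h2.symm
    subst hext
    have hfix : (passA dep head (c, false)).1 = c := by rw [hr]; simp
    rw [loopA, if_neg hcond, hfix] at hp ⊢
    obtain ⟨d, hd, hld, hh⟩ := he
    exact passA_fix (PySem.List.enumerate dep 1) c false hfix (x, d) hd (by simpa [hh]) hld

theorem stepB_nodup (cs : List Int) : ∀ (col stk : List Int), col.Nodup →
    (cs.foldl stepB (col, stk)).1.Nodup := by
  induction cs with
  | nil => exact fun col stk hc => hc
  | cons c cs ih =>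
    intro col stk hc
    rw [List.foldl_cons]
    by_cases hm : c ∈ col
    · simp only [stepB, if_pos hm]
      exact ih col stk hc
    · simp only [stepB, if_neg hm, PySem.Set.add_of_not_mem hm]
      exact ih _ _ (pvNodupSnoc hc hm)

theorem bfsB_nodup (dep : List String) (head : List Int) :
    ∀ (col stack : List Int), col.Nodup → (bfsB dep head col stack).Nodup := by
  intro col stack
  induction col, stack using bfsB.induct dep head with
  | case1 col => exact fun hc => by rw [bfsB]; exact hc
  | case2 col q rest ih =>
    intro hc
    rw [bfsB]
    exact ih (stepB_nodup _ col _ hc)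

theorem bfsB_mem {seeds : List Int} (dep : List String) (head : List Int) :
    ∀ (col stack : List Int), (∀ q ∈ stack, q ∈ col) →
      (∀ x ∈ col, ReachE seeds dep head x) → (∀ s ∈ seeds, s ∈ col) →
      (∀ p ∈ col, p ∈ stack ∨ ∀ x, EdgeE dep head p x → x ∈ col) →
      ∀ x, (x ∈ bfsB dep head col stack ↔ ReachE seeds dep head x) := by
  intro col stack
  induction col, stack using bfsB.induct dep head with
  | case1 col =>
    intro _ hsound hseed hproc x
    rw [bfsB]
    constructor
    · exact hsound x
    · refine reach_sub_of_closed hseed (fun p y hp he => ?_) x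
      rcases hproc p hp with h | h
      · exact absurd h (List.not_mem_nil)
      · exact h y he
  | case2 col q rest ih =>
    intro hstk hsound hseed hproc x
    rw [bfsB]
    obtain ⟨ext, he, hx, hall⟩ :=
      stepB_ext ((childrenB dep head).getD ((q :: rest).getLast (by simp)) [])
        col ((q :: rest).dropLast)
    have hr : innerB dep head ((q :: rest).getLast (by simp)) (col, (q :: rest).dropLast)
        = (col ++ ext, (q :: rest).dropLast ++ ext) := he
    have hp_in : (q :: rest).getLast (by simp) ∈ q :: rest := List.getLast_mem _
    have hsplit : (q :: rest).dropLast ++ [(q :: rest).getLast (by simp)] = q :: rest :=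
      List.dropLast_append_getLast (by simp)
    have hreach_p : ReachE seeds dep head ((q :: rest).getLast (by simp)) :=
      hsound _ (hstk _ hp_in)
    simp only [hr] at ih ⊢
    apply ih
    · intro q' hq'
      rcases List.mem_append.1 hq' with h | h
      · exact List.mem_append.2 (Or.inl (hstk q' (by rw [← hsplit]; exact List.mem_append.2 (Or.inl h))))
      · exact List.mem_append.2 (Or.inr h)
    · intro y hy
      rcases List.mem_append.1 hy with h | h
      · exact hsound y h
      · exact .step _ _ hreach_p ((mem_childrenB dep head _ y).1 (hx y h).1)
    · exact fun s hs => List.mem_append.2 (Or.inl (hseed s hs))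
    · intro p' hp'
      rcases List.mem_append.1 hp' with h | h
      · rcases hproc p' h with hin | hcl
        · rw [← hsplit] at hin
          rcases List.mem_append.1 hin with hin | hin
          · exact Or.inl (List.mem_append.2 (Or.inl hin))
          · simp only [List.mem_singleton] at hin
            subst hin
            exact Or.inr (fun y hey => hall y ((mem_childrenB dep head _ y).2 hey))
        · exact Or.inr (fun y hey => List.mem_append.2 (Or.inl (hcl y hey)))
      · exact Or.inl (List.mem_append.2 (Or.inr h))

-- ===== VERDICT (by name: the statement is the Claim_ definition above) =====
theorem expand_entity_indices_spec : Claim_equal_expand_entity_indices := by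
  unfold Claim_equal_expand_entity_indices
  intro seeds dep head _ _
  unfold Spec_expand_entity_indices expand_entity_indices expand_entity_indices_alt
  by_cases hs : seeds = []
  · simp [hs]
  · rw [if_neg hs, if_neg hs]
    have hA : ∀ x, x ∈ loopA dep head (PySem.Set.ofList seeds) ↔ ReachE seeds dep head x := by
      intro x
      constructor
      · exact loopA_sound dep head _ (fun y hy => .seed y ((PySem.Set.mem_ofList _ _).1 hy)) x
      · refine reach_sub_of_closed ?_ (loopA_closed dep head _) x
        exact fun s hsm => loopA_super dep head _ s ((PySem.Set.mem_ofList _ _).2 hsm)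
    have hB : ∀ x, x ∈ bfsB dep head (PySem.Set.ofList seeds) seeds ↔ ReachE seeds dep head x := by
      apply bfsB_mem dep head (PySem.Set.ofList seeds) seeds
      · exact fun q hq => (PySem.Set.mem_ofList _ _).2 hq
      · exact fun x hx => .seed x ((PySem.Set.mem_ofList _ _).1 hx)
      · exact fun s hsm => (PySem.Set.mem_ofList _ _).2 hsm
      · exact fun p hp => Or.inl ((PySem.Set.mem_ofList _ _).1 hp)
    have hperm : (loopA dep head (PySem.Set.ofList seeds)).Perm
        (bfsB dep head (PySem.Set.ofList seeds) seeds) := by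
      rw [List.perm_ext_iff_of_nodup
        (loopA_nodup dep head _ (PySem.Set.nodup_ofList seeds))
        (bfsB_nodup dep head _ seeds (PySem.Set.nodup_ofList seeds))]
      intro a
      rw [hA, hB]
    exact PySem.List.sorted_eq_sorted_of_perm _ _ _ (fun a b h => h) hperm
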